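-- pv_equiv track=rewrite | github.com/alafa/theegg_ai | tarea_38/el_biologo/main.py | get_comparable_strings
-- ===== SOURCE A (Python) =====
-- def get_comparable_strings(s1, s2):
--     largest_str = s1
--     shortest_str = s2
--
--     if len(s1) < len(s2):
--         largest_str = s2
--         shortest_str = s1
--
--     # Entrando
--     for i in range(len(shortest_str)):
--         yield largest_str[0:i+1], shortest_str[-i-1:]
--
--     # Se desplaza dentro
--     for i in range(len(largest_str) - len(shortest_str)):
--         yield largest_str[i+1: i+1 + len(shortest_str)], shortest_str
--
--     # Saliendo
--     for i in range(len(shortest_str) - 1):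
--         yield largest_str[-len(shortest_str) + 1 + i:], shortest_str[0:len(shortest_str) - 1 -i]
-- ===== SOURCE B (Python) =====
-- def get_comparable_strings(s1, s2):
--     largest, shortest = (s2, s1) if len(s1) < len(s2) else (s1, s2)
--     w = ""
--     suf = ""
--     # entering: stream one char of largest from the left, one char of shortest from the right
--     for c, d in zip(largest, reversed(shortest)):
--         w += c
--         suf = d + suf
--         yield w, suf
--     # sliding inside: append the next char and trim the window from the front
--     for c in largest[len(shortest):]:
--         w = (w + c)[1:]
--         yield w, shortest
--     # leaving: shrink the window from the left and shortest from the right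
--     while len(w) > 1:
--         w = w[1:]
--         shortest = shortest[:-1]
--         yield w, shortest
-- ===== Notes on version B (the rewrite author's own statement) =====
-- stated objective: alternative
-- what changed: Instead of computing each pair by index-arithmetic slices of the full strings, B streams: it maintains the current window and counterpart as strings and edits them by one character per step (zip with reversed shortest, then an append-and-trim shift loop, then a shrink loop), never computing a slice from indices.
import Mathlib
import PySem

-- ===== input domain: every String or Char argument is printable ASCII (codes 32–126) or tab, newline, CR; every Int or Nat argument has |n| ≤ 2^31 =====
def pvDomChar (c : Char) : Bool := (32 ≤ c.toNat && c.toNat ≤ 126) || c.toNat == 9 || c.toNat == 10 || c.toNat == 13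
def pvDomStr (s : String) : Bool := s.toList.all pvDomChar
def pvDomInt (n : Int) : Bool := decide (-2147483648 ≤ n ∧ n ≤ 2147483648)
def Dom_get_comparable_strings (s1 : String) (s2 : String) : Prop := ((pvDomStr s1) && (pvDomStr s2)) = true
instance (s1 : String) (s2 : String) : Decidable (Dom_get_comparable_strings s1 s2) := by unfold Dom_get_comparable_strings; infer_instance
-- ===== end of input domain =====

-- B replaces A's index-arithmetic slice loops by a streaming pass that maintains
-- the current window/counterpart strings and edits them one character per step
-- (objective: alternative decomposition, same cost).


-- ===== PORT A =====
-- the three yield loops of A, over the already-ordered (largest, shortest) pair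
def gcsA_phases (largest_str : String) (shortest_str : String) : List (String × String) :=
  ((PySem.List.pyRange 0 (PySem.Str.len shortest_str) 1).map
    (fun i => (PySem.Str.slice largest_str (some 0) (some (i + 1)),
               PySem.Str.slice shortest_str (some (-i - 1)) none)))
  ++ ((PySem.List.pyRange 0 (PySem.Str.len largest_str - PySem.Str.len shortest_str) 1).map
    (fun i => (PySem.Str.slice largest_str (some (i + 1)) (some (i + 1 + PySem.Str.len shortest_str)),
               shortest_str)))
  ++ ((PySem.List.pyRange 0 (PySem.Str.len shortest_str - 1) 1).map
    (fun i => (PySem.Str.slice largest_str (some (-(PySem.Str.len shortest_str) + 1 + i)) none,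
               PySem.Str.slice shortest_str (some 0) (some (PySem.Str.len shortest_str - 1 - i)))))

def get_comparable_strings (s1 : String) (s2 : String) : List (String × String) :=
  if PySem.Str.len s1 < PySem.Str.len s2 then gcsA_phases s2 s1 else gcsA_phases s1 s2

-- ===== PORT B =====
-- entering loop: for (c,d) in zip(largest, reversed(shortest)): w += c; suf = d + suf; yield w, suf
-- returns the yielded pairs together with the final window w
def gcsB_enter : List (Char × Char) → List Char → List Char → (List (String × String) × List Char)
  | [], w, _ => ([], w)
  | (c, d) :: rest, w, suf =>
      let w' := w ++ [c]
      let suf' := d :: suf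
      let r := gcsB_enter rest w' suf'
      ((String.ofList w', String.ofList suf') :: r.1, r.2)

-- sliding loop: for c in largest[len(shortest):]: w = (w + c)[1:]; yield w, shortest
def gcsB_slide (S : String) : List Char → List Char → (List (String × String) × List Char)
  | [], w => ([], w)
  | c :: rest, w =>
      let w' := (w ++ [c]).drop 1
      let r := gcsB_slide S rest w'
      ((String.ofList w', S) :: r.1, r.2)

-- leaving loop: while len(w) > 1: w = w[1:]; shortest = shortest[:-1]; yield w, shortest
def gcsB_exit : List Char → List Char → List (String × String)
  | [], _ => []
  | [_], _ => []
  | _ :: w', S => (String.ofList w', String.ofList S.dropLast) :: gcsB_exit w' S.dropLast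

def gcsB_stream (largest shortest : String) : List (String × String) :=
  let Ll := largest.toList
  let Sl := shortest.toList
  let e := gcsB_enter (Ll.zip Sl.reverse) [] []
  let s := gcsB_slide shortest (Ll.drop Sl.length) e.2
  e.1 ++ s.1 ++ gcsB_exit s.2 Sl

def get_comparable_strings_alt (s1 : String) (s2 : String) : List (String × String) :=
  if PySem.Str.len s1 < PySem.Str.len s2 then gcsB_stream s2 s1 else gcsB_stream s1 s2

-- ===== PRECONDITION & SPEC =====
def Spec_get_comparable_strings (s1 : String) (s2 : String) (out : List (String × String)) : Prop := out = get_comparable_strings_alt s1 s2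
instance (s1 : String) (s2 : String) (out : List (String × String)) : Decidable (Spec_get_comparable_strings s1 s2 out) := by unfold Spec_get_comparable_strings; infer_instance

-- ===== CLAIM (what is proved, stated in full; the proofs are below) =====
def Claim_equal_get_comparable_strings : Prop := ∀ (s1 : String) (s2 : String), Dom_get_comparable_strings s1 s2 → Spec_get_comparable_strings s1 s2 (get_comparable_strings s1 s2)

-- ===== LEMMAS AND PROOFS =====

-- the canonical form both sides are reduced to (for 1 ≤ m ≤ n)
def gcsCanon (Ll Sl : List Char) (S : String) : List (String × String) :=
  let m := Sl.length
  let n := Ll.length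
  ((List.range m).map (fun i => (String.ofList (Ll.take (i+1)), String.ofList (Sl.drop (m - (i+1))))))
  ++ ((List.range (n - m)).map (fun i => (String.ofList ((Ll.drop (i+1)).take m), S)))
  ++ ((List.range (m - 1)).map (fun i => (String.ofList (Ll.drop (n - (m-1-i))), String.ofList (Sl.take (m-1-i)))))

lemma enter_spec (xs : List Char) : ∀ (ys w suf : List Char),
    gcsB_enter (xs.zip ys) w suf
      = ((List.range (min xs.length ys.length)).map
          (fun i => (String.ofList (w ++ xs.take (i+1)), String.ofList ((ys.take (i+1)).reverse ++ suf))),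
         w ++ xs.take (min xs.length ys.length)) := by
  induction xs with
  | nil => intro ys w suf; simp [gcsB_enter]
  | cons c xs ih =>
    intro ys w suf
    cases ys with
    | nil => simp [gcsB_enter]
    | cons d ys =>
      have hmin : min (c :: xs).length (d :: ys).length = min xs.length ys.length + 1 := by
        simp [Nat.succ_min_succ]
      rw [List.zip_cons_cons]
      show ((String.ofList (w ++ [c]), String.ofList (d :: suf)) :: (gcsB_enter (xs.zip ys) (w ++ [c]) (d :: suf)).1,
            (gcsB_enter (xs.zip ys) (w ++ [c]) (d :: suf)).2) = _
      rw [ih]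
      rw [hmin, List.range_succ_eq_map]
      simp only [List.map_cons, List.map_map]
      simp [Function.comp_def, List.take_succ_cons, List.append_assoc]

lemma slide_spec (cs : List Char) (S : String) : ∀ (w : List Char),
    gcsB_slide S cs w
      = ((List.range cs.length).map (fun i => (String.ofList ((w ++ cs.take (i+1)).drop (i+1)), S)),
         (w ++ cs).drop cs.length) := by
  induction cs with
  | nil => intro w; simp [gcsB_slide]
  | cons c cs ih =>
    intro w
    have hdrop : ∀ (t : List Char), ((w ++ [c]).drop 1) ++ t = (w ++ [c] ++ t).drop 1 := by
      intro t
      cases w with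
      | nil => simp
      | cons a w => simp
    show ((String.ofList ((w ++ [c]).drop 1), S) :: (gcsB_slide S cs ((w ++ [c]).drop 1)).1,
          (gcsB_slide S cs ((w ++ [c]).drop 1)).2) = _
    rw [ih]
    refine Prod.ext ?_ ?_
    · show _ :: _ = (List.range (cs.length + 1)).map _
      rw [List.range_succ_eq_map]
      simp only [List.map_cons, List.map_map]
      refine congrArg₂ _ ?_ ?_
      · have h0 : (w ++ (c :: cs).take (0+1)).drop (0+1) = (w ++ [c]).drop 1 := by
          simp
        exact congrArg (fun l => (String.ofList l, S)) h0.symm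
      · refine List.map_congr_left ?_
        intro k _
        simp only [Function.comp_apply, Nat.succ_eq_add_one]
        congr 2
        have h1 : (w ++ [c]).drop 1 ++ cs.take (k+1) = (w ++ (c :: cs).take (k+1+1)).drop 1 := by
          rw [List.take_succ_cons, hdrop (cs.take (k+1))]
          simp
        rw [h1, List.drop_drop]
        simp [Nat.add_comm]
    · show ((w ++ [c]).drop 1 ++ cs).drop cs.length = (w ++ c :: cs).drop (cs.length + 1)
      have h2 : (w ++ [c]).drop 1 ++ cs = (w ++ c :: cs).drop 1 := by
        rw [hdrop cs]; simp
      rw [h2, List.drop_drop, Nat.add_comm]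

lemma exit_spec (w : List Char) : ∀ (S : List Char),
    gcsB_exit w S
      = (List.range (w.length - 1)).map
          (fun i => (String.ofList (w.drop (i+1)), String.ofList (S.take (S.length - (i+1))))) := by
  induction w with
  | nil => intro S; simp [gcsB_exit]
  | cons a w ih =>
    intro S
    cases w with
    | nil => simp [gcsB_exit]
    | cons b w =>
      show (String.ofList (b :: w), String.ofList S.dropLast) :: gcsB_exit (b :: w) S.dropLast = _
      rw [ih]
      have hlen : (a :: b :: w).length - 1 = ((b :: w).length - 1) + 1 := by simp
      rw [hlen, List.range_succ_eq_map]
      simp only [List.map_cons, List.map_map]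
      refine congrArg₂ _ ?_ ?_
      · refine congrArg₂ _ rfl ?_
        rw [List.dropLast_eq_take]
      · refine List.map_congr_left ?_
        intro k _
        simp only [Function.comp_apply, Nat.succ_eq_add_one]
        refine congrArg₂ _ rfl ?_
        congr 1
        rw [List.dropLast_eq_take, List.take_take, List.length_take]
        congr 1
        omega

lemma gcsB_eq_canon (L S : String) (h2 : S.toList.length ≤ L.toList.length) :
    gcsB_stream L S = gcsCanon L.toList S.toList S := by
  have hmin : min L.toList.length S.toList.reverse.length = S.toList.length := by
    rw [List.length_reverse]; omega
  show (gcsB_enter (L.toList.zip S.toList.reverse) [] []).1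
      ++ (gcsB_slide S (L.toList.drop S.toList.length) (gcsB_enter (L.toList.zip S.toList.reverse) [] []).2).1
      ++ gcsB_exit (gcsB_slide S (L.toList.drop S.toList.length) (gcsB_enter (L.toList.zip S.toList.reverse) [] []).2).2 S.toList
    = gcsCanon L.toList S.toList S
  rw [enter_spec, hmin]
  rw [slide_spec]
  simp only [List.nil_append]
  rw [exit_spec]
  unfold gcsCanon
  have htd : L.toList.take S.toList.length ++ L.toList.drop S.toList.length = L.toList :=
    List.take_append_drop _ _
  have hlen2 : ((L.toList.take S.toList.length ++ L.toList.drop S.toList.length).drop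
      (L.toList.drop S.toList.length).length).length - 1 = S.toList.length - 1 := by
    rw [htd]; simp only [List.length_drop]; omega
  refine congrArg₂ _ (congrArg₂ _ ?_ ?_) ?_
  · -- entering
    refine List.map_congr_left ?_
    intro k hk
    rw [List.mem_range] at hk
    refine congrArg₂ _ rfl ?_
    rw [List.take_reverse, List.reverse_reverse, List.append_nil]
  · -- sliding
    simp only [List.length_drop]
    refine List.map_congr_left ?_
    intro k hk
    rw [List.mem_range] at hk
    refine congrArg₂ _ ?_ rfl
    congr 1
    rw [← List.take_add, List.drop_take]
    congr 1
    omega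
  · -- leaving
    rw [hlen2, htd]
    simp only [List.length_drop]
    refine List.map_congr_left ?_
    intro k hk
    rw [List.mem_range] at hk
    refine congrArg₂ _ ?_ ?_
    · rw [List.drop_drop]
      congr 2
      omega
    · congr 1
      · congr 1
        omega

lemma str_slice_ofList (s : String) (a b : Option Int) :
    PySem.Str.slice s a b = String.ofList (PySem.List.slice s.toList a b) := by
  unfold PySem.Str.slice
  rw [PySem.Chars.slice_eq_listSlice]

lemma gcsA_eq_canon (L S : String) (h2 : S.toList.length ≤ L.toList.length) :
    gcsA_phases L S = gcsCanon L.toList S.toList S := by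
  unfold gcsA_phases gcsCanon
  simp only [PySem.Str.len_eq, PySem.List.pyRange_one, List.map_map]
  have e1 : ((S.toList.length : Int) - 0).toNat = S.toList.length := by omega
  have e2 : ((L.toList.length : Int) - (S.toList.length : Int) - 0).toNat
      = L.toList.length - S.toList.length := by omega
  have e3 : ((S.toList.length : Int) - 1 - 0).toNat = S.toList.length - 1 := by omega
  rw [e1, e2, e3]
  refine congrArg₂ _ (congrArg₂ _ ?_ ?_) ?_
  · refine List.map_congr_left ?_
    intro k hk
    rw [List.mem_range] at hk
    simp only [Function.comp_apply]
    refine congrArg₂ _ ?_ ?_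
    · rw [str_slice_ofList]
      congr 1
      have : (0 : Int) + (k : Int) + 1 = ((k + 1 : Nat) : Int) := by push_cast; ring
      rw [this, PySem.List.slice_zero_start, PySem.List.slice_to_natCast]
    · rw [str_slice_ofList]
      congr 1
      have : -((0 : Int) + (k : Int)) - 1 = -((k + 1 : Nat) : Int) := by push_cast; ring
      rw [this, PySem.List.slice_from_neg_natCast _ _ (by omega)]
  · refine List.map_congr_left ?_
    intro k hk
    rw [List.mem_range] at hk
    simp only [Function.comp_apply]
    refine congrArg₂ _ ?_ rfl
    rw [str_slice_ofList]
    congr 1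
    have ha : (0 : Int) + (k : Int) + 1 = ((k + 1 : Nat) : Int) := by push_cast; ring
    rw [ha, PySem.List.slice_natCast_add]
  · refine List.map_congr_left ?_
    intro k hk
    rw [List.mem_range] at hk
    simp only [Function.comp_apply]
    refine congrArg₂ _ ?_ ?_
    · rw [str_slice_ofList]
      congr 1
      have : -((S.toList.length : Int)) + 1 + ((0 : Int) + (k : Int))
          = -((S.toList.length - 1 - k : Nat) : Int) := by omega
      rw [this, PySem.List.slice_from_neg_natCast _ _ (by omega)]
    · rw [str_slice_ofList]
      congr 1
      have : (S.toList.length : Int) - 1 - ((0 : Int) + (k : Int))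
          = ((S.toList.length - 1 - k : Nat) : Int) := by omega
      rw [this, PySem.List.slice_zero_start, PySem.List.slice_to_natCast]

lemma gcs_body_eq (L S : String) (h2 : S.toList.length ≤ L.toList.length) :
    gcsA_phases L S = gcsB_stream L S := by
  rw [gcsA_eq_canon L S h2, gcsB_eq_canon L S h2]

-- ===== VERDICT (by name: the statement is the Claim_ definition above) =====
theorem get_comparable_strings_spec : Claim_equal_get_comparable_strings := by
  intro s1 s2 _
  unfold Spec_get_comparable_strings get_comparable_strings get_comparable_strings_alt
  by_cases hlt : PySem.Str.len s1 < PySem.Str.len s2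
  · have hle : s1.toList.length ≤ s2.toList.length := by
      simp [PySem.Str.len] at hlt
      exact_mod_cast le_of_lt hlt
    simp only [if_pos hlt]
    exact gcs_body_eq s2 s1 hle
  · have hle : s2.toList.length ≤ s1.toList.length := by
      simp [PySem.Str.len] at hlt
      exact_mod_cast hlt
    simp only [if_neg hlt]
    exact gcs_body_eq s1 s2 hle
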